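-- pv_equiv track=rewrite | github.com/AlexisDemont/pychatbot-Demont-Youssef-BDX | president.py | extractTheNameFromThis
-- ===== SOURCE A (Python) =====
-- def extractTheNameFromThis(filename):
--     name = filename
--     if '_' in filename:
--         name = name.split("_")[1]
--     if '.' in filename:
--         name = name.split(".")[0]
--     for character in name:
--         if character.isnumeric():
--             name = name.split(character)[0]
--     return name
-- ===== SOURCE B (Python) =====
-- def extractTheNameFromThis(filename):
--     name = filename
--     if '_' in filename:
--         name = filename.partition('_')[2].partition('_')[0]
--     if '.' in filename:
--         name = name.partition('.')[0]
--     idx = next((i for i, c in enumerate(name) if c.isnumeric()), len(name))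
--     return name[:idx]
-- ===== Notes on version B (the rewrite author's own statement) =====
-- stated objective: simpler
-- what changed: The split-index parsing becomes partition/slice, and the mutate-while-iterating loop of repeated name.split(character) passes becomes one scan for the leftmost numeric character followed by a single slice.
import Mathlib
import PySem

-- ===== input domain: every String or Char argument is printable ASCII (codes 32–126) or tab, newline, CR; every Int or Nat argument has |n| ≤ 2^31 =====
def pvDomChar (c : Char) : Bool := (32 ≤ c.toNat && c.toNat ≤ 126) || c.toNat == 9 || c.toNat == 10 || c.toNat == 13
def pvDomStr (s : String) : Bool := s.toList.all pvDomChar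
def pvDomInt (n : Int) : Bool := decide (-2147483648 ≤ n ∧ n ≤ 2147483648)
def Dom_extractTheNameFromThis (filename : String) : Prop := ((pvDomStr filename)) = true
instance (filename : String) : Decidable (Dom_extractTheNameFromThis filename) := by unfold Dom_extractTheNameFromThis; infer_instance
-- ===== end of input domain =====

-- B replaces A's repeated-split mutate-while-iterating loop by one scan for the leftmost numeric
-- character plus a single slice (objective: simpler). Equal return values on the whole domain.

-- str.isnumeric(c): on the printable-ASCII/tab/newline domain Dom_ the numeric characters are
-- exactly the digits '0'..'9', where isnumeric agrees with isdigit; exact there.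
def pyIsNumeric (c : Char) : Bool := PySem.Chars.isdigit c

-- ===== PORT A =====
def extractTheNameFromThis (filename : String) : String :=
  let fn := filename.toList
  let name := fn
  -- name.split("_")[1]: guarded by '_' in filename, so index 1 always exists (getD never defaults)
  let name := if PySem.Chars.isIn ['_'] fn then (PySem.Chars.splitOn name ['_']).getD 1 [] else name
  -- name.split(".")[0]: split is never empty, index 0 always exists
  let name := if PySem.Chars.isIn ['.'] fn then (PySem.Chars.splitOn name ['.']).getD 0 [] else name
  -- for character in name: if character.isnumeric(): name = name.split(character)[0]
  -- (Python iterates over the string `name` was bound to when the loop starts, while rebinding `name`)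
  let name := name.foldl
    (fun nm ch => if pyIsNumeric ch then (PySem.Chars.splitOn nm [ch]).getD 0 [] else nm) name
  String.ofList name

-- ===== PORT B =====
def extractTheNameFromThis_alt (filename : String) : String :=
  let fn := filename.toList
  -- filename.partition('_')[2].partition('_')[0]
  let name := if PySem.Chars.isIn ['_'] fn then
      ((fn.dropWhile (· != '_')).drop 1).takeWhile (· != '_')
    else fn
  -- name.partition('.')[0]
  let name := if PySem.Chars.isIn ['.'] fn then name.takeWhile (· != '.') else name
  -- idx = first index with c.isnumeric() (len(name) if none); return name[:idx]
  String.ofList (name.takeWhile (fun ch => !pyIsNumeric ch))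

-- ===== PRECONDITION & SPEC =====
def Spec_extractTheNameFromThis (filename : String) (out : String) : Prop := out = extractTheNameFromThis_alt filename
instance (filename : String) (out : String) : Decidable (Spec_extractTheNameFromThis filename out) := by unfold Spec_extractTheNameFromThis; infer_instance

-- ===== CLAIM (what is proved, stated in full; the proofs are below) =====
def Claim_equal_extractTheNameFromThis : Prop := ∀ (filename : String), Dom_extractTheNameFromThis filename → Spec_extractTheNameFromThis filename (extractTheNameFromThis filename)

-- ===== LEMMAS AND PROOFS =====

-- splitOn with a one-character separator, characterised recursively.
theorem splitOn_go_single (c : Char) : ∀ (l : List Char) (fuel : Nat), l.length ≤ fuel →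
    ∀ (cur : List Char) (acc : List (List Char)),
    PySem.Chars.splitOn.go [c] fuel l cur acc =
      acc.reverse ++ (cur.reverse ++ l.takeWhile (· != c)) ::
        (if c ∈ l then PySem.Chars.splitOn ((l.dropWhile (· != c)).drop 1) [c] else []) := by
  intro l
  induction l with
  | nil =>
    intro fuel _ cur acc
    cases fuel <;> simp [PySem.Chars.splitOn.go]
  | cons a tl ih =>
    intro fuel hf cur acc
    cases fuel with
    | zero => simp at hf
    | succ f =>
      by_cases hac : a = c
      · subst hac
        have hpre : [a].isPrefixOf (a :: tl) = true := by simp [List.isPrefixOf]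
        rw [PySem.Chars.splitOn.go, if_pos hpre]
        have h1 := ih f (by simpa using hf) [] (cur.reverse :: acc)
        have h2 := ih (tl.length + 1) (by omega) [] []
        simp only [List.reverse_cons, List.reverse_nil, List.nil_append, List.append_assoc] at h1
        rw [show List.drop ([a]).length (a :: tl) = tl by simp, h1]
        have : PySem.Chars.splitOn tl [a] =
            tl.takeWhile (· != a) ::
              (if a ∈ tl then PySem.Chars.splitOn ((tl.dropWhile (· != a)).drop 1) [a] else []) := by
          rw [PySem.Chars.splitOn, h2]; simp
        simp [this]
      · have hpre : [c].isPrefixOf (a :: tl) = false := by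
          simp [List.isPrefixOf]; exact fun h => (hac h.symm).elim
        rw [PySem.Chars.splitOn.go, hpre]
        simp only [Bool.false_eq_true, if_false]
        have h1 := ih f (by simpa using hf) (a :: cur) acc
        rw [h1]
        have hne : (a != c) = true := by simp [hac]
        simp [hne, show ¬ c = a from fun h => hac h.symm]

theorem splitOn_single (l : List Char) (c : Char) :
    PySem.Chars.splitOn l [c] =
      l.takeWhile (· != c) ::
        (if c ∈ l then PySem.Chars.splitOn ((l.dropWhile (· != c)).drop 1) [c] else []) := by
  rw [PySem.Chars.splitOn, splitOn_go_single c l (l.length + 1) (by omega) [] []]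
  simp

-- split(c)[0] is the prefix before the first occurrence of c.
theorem splitOn_head (l : List Char) (c : Char) :
    (PySem.Chars.splitOn l [c]).getD 0 [] = l.takeWhile (· != c) := by
  rw [splitOn_single]; rfl

-- split(c)[1], when c occurs, is the piece between the first and second occurrences of c.
theorem splitOn_second (l : List Char) (c : Char) (h : c ∈ l) :
    (PySem.Chars.splitOn l [c]).getD 1 [] =
      ((l.dropWhile (· != c)).drop 1).takeWhile (· != c) := by
  rw [splitOn_single, if_pos h]
  show (PySem.Chars.splitOn ((l.dropWhile (· != c)).drop 1) [c]).getD 0 [] = _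
  exact splitOn_head _ c

-- a stretch of non-numeric characters contributes no steps, whatever the accumulator is
theorem foldl_split_id (l : List Char) (acc : List Char) (h : ∀ x ∈ l, pyIsNumeric x = false) :
    l.foldl (fun nm ch => if pyIsNumeric ch then (PySem.Chars.splitOn nm [ch]).getD 0 [] else nm) acc
      = acc := by
  induction l generalizing acc with
  | nil => rfl
  | cons a l ih =>
    simp only [List.foldl_cons, h a (List.mem_cons_self), Bool.false_eq_true, if_false]
    exact ih acc (fun x hx => h x (List.mem_cons_of_mem a hx))

-- A's numeric loop leaves an all-non-numeric accumulator unchanged.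
theorem foldl_split_const (l t : List Char) (h : ∀ x ∈ t, pyIsNumeric x = false) :
    l.foldl (fun nm ch => if pyIsNumeric ch then (PySem.Chars.splitOn nm [ch]).getD 0 [] else nm) t
      = t := by
  induction l with
  | nil => rfl
  | cons a l ih =>
    simp only [List.foldl_cons]
    by_cases ha : pyIsNumeric a = true
    · rw [if_pos ha, splitOn_head,
        List.takeWhile_eq_self_iff.mpr (fun x hx => by
          have := h x hx
          simp only [bne_iff_ne, ne_eq]
          intro hxa; rw [hxa, ha] at this; exact Bool.true_eq_false.mp this)]
      exact ih
    · rw [if_neg ha]; exact ih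

-- A's numeric loop computes B's cut at the first numeric character.
theorem foldl_split_numeric (name : List Char) :
    name.foldl (fun nm ch => if pyIsNumeric ch then (PySem.Chars.splitOn nm [ch]).getD 0 [] else nm) name
      = name.takeWhile (fun ch => !pyIsNumeric ch) := by
  have hdecomp := List.takeWhile_append_dropWhile (p := fun ch => !pyIsNumeric ch) (l := name)
  set t := name.takeWhile (fun ch => !pyIsNumeric ch) with ht
  set r := name.dropWhile (fun ch => !pyIsNumeric ch) with hr
  have htnum : ∀ x ∈ t, pyIsNumeric x = false := by
    intro x hx
    have := List.mem_takeWhile_imp hx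
    simpa using this
  conv_lhs => rw [show name = t ++ r from hdecomp.symm]
  rw [List.foldl_append, foldl_split_id t (t ++ r) htnum]
  cases hcase : r with
  | nil => simp
  | cons d r' =>
    have hdw : name.dropWhile (fun ch => !pyIsNumeric ch) = d :: r' := by
      rw [← hr]; exact hcase
    have hd : pyIsNumeric d = true := by
      have h0 := List.head_dropWhile_not (fun ch => !pyIsNumeric ch) (l := name)
        (by simp [hdw])
      simp only [hdw, List.head_cons] at h0
      simpa using h0
    have hcut : (t ++ d :: r').takeWhile (· != d) = t := by
      rw [List.takeWhile_append_of_pos (fun x hx => by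
        have := htnum x hx
        simp only [bne_iff_ne, ne_eq]
        intro hxd; rw [hxd, hd] at this; exact Bool.true_eq_false.mp this)]
      simp
    simp only [List.foldl_cons]
    rw [if_pos hd, splitOn_head, hcut]
    exact foldl_split_const r' t htnum


-- guard '(c in s)' gives membership
theorem isIn_singleton_mem (c : Char) (l : List Char) (h : PySem.Chars.isIn [c] l = true) :
    c ∈ l := by
  rw [PySem.Chars.isIn_iff_infix] at h
  exact (List.singleton_infix_iff c l).mp h

-- ===== VERDICT (by name: the statement is the Claim_ definition above) =====
theorem extractTheNameFromThis_spec : Claim_equal_extractTheNameFromThis := by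
  intro filename _
  unfold Spec_extractTheNameFromThis extractTheNameFromThis extractTheNameFromThis_alt
  simp only []
  set fn := filename.toList with hfn
  by_cases hu : PySem.Chars.isIn ['_'] fn = true <;>
    by_cases hd : PySem.Chars.isIn ['.'] fn = true <;>
      simp only [hu, hd, if_pos, Bool.false_eq_true, if_false,
        foldl_split_numeric] <;>
      first
        | rw [splitOn_second fn '_' (isIn_singleton_mem '_' fn hu), splitOn_head]
        | rw [splitOn_second fn '_' (isIn_singleton_mem '_' fn hu)]
        | rw [splitOn_head]
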